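-- pv_equiv track=rewrite | github.com/thatguyandy27/AdventOfCode2020 | Day7/bagTree.py | getNodeCount
-- ===== SOURCE A (Python) =====
-- def getNodeCount(id, nodes, visited):
--     if id in visited:
--         return visited[id]
--
--     children = nodes[id]
--
--     count = 1
--     for c in children:
--         count += getNodeCount(c, nodes, visited)
--
--     visited[id] = count
--     return visited[id]
-- ===== SOURCE B (Python) =====
-- def getNodeCount(id, nodes, visited):
--     # Iterative bottom-up evaluation: repeatedly resolve any node whose
--     # children are all resolved, until id itself is resolved.
--     # (Return-value equivalent to the recursive version; does not mutate visited.)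
--     table = dict(visited)
--     while id not in table:
--         for k, cs in nodes.items():
--             if k not in table and all(c in table for c in cs):
--                 table[k] = 1 + sum(table[c] for c in cs)
--                 break
--         else:
--             raise ValueError("cycle detected or missing node")
--     return table[id]
-- ===== Notes on version B (the rewrite author's own statement) =====
-- stated objective: alternative
-- what changed: Replaces the top-down memoized recursion with an iterative bottom-up dynamic-programming loop that repeatedly resolves any node whose children are already resolved (no recursion, no memo-passing), reading off the count of id from the finished table.
import Mathlib
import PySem

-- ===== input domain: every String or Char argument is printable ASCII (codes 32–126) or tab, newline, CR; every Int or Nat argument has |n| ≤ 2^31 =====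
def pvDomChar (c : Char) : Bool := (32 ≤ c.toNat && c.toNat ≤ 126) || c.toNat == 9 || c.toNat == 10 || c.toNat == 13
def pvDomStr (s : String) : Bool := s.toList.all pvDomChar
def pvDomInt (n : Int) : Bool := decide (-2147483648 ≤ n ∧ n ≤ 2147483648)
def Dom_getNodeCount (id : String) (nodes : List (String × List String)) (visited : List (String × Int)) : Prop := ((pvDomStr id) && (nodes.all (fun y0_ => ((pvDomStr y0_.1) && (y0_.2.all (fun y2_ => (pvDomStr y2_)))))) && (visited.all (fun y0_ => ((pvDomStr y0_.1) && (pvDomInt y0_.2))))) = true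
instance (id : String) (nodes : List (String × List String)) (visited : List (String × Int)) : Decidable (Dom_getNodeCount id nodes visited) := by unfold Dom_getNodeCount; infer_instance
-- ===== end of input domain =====

-- B replaces A's top-down memoized recursion by an iterative bottom-up table loop; A mutates
-- `visited` in place while B does not, so the equivalence proved here is about the RETURN value only.

-- ===== PORT A =====
-- shared conversions: the Python caller passes `nodes` and `visited` as dicts
def pvND (nodes : List (String × List String)) : PySem.Dict String (List String) :=
  PySem.Dict.ofList nodes
def pvVD (visited : List (String × Int)) : PySem.Dict String Int :=
  PySem.Dict.ofList visited
-- recursion fuel: under Pre_ the recursion depth (resp. number of loop rounds) is bounded by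
-- the number of distinct reachable ids, which is < pvFuel; Python A diverges/raises only outside Pre_
def pvFuel (nodes : List (String × List String)) (visited : List (String × Int)) : Nat :=
  nodes.length + visited.length + 2

-- A's recursion, with the mutated dict threaded through; none = KeyError or out of fuel (A raises)
def pvAGo (N : PySem.Dict String (List String)) :
    Nat → String → PySem.Dict String Int → Option (Int × PySem.Dict String Int)
  | 0, _, _ => none
  | Nat.succ n, k, d =>
    if d.contains k then (d.get? k).map (fun v => (v, d))      -- if id in visited: return visited[id]
    else
      match N.get? k with                                       -- children = nodes[id]  (KeyError → none)
      | none => none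
      | some cs =>
        -- count = 1; for c in children: count += getNodeCount(c, nodes, visited)
        match cs.foldl (fun acc c =>
            acc.bind (fun p => (pvAGo N n c p.2).map (fun q => (p.1 + q.1, q.2))))
            (some ((1 : Int), d)) with
        | none => none
        | some p => some (p.1, p.2.insert k p.1)                -- visited[id] = count; return visited[id]

def getNodeCount (id : String) (nodes : List (String × List String)) (visited : List (String × Int)) : Int :=
  ((pvAGo (pvND nodes) (pvFuel nodes visited) id (pvVD visited)).map Prod.fst).getD 0

-- ===== PORT B =====
-- first (k, cs) of the items list with k unresolved and every child already resolved
def pvBReady (t : PySem.Dict String Int) :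
    List (String × List String) → Option (String × List String)
  | [] => none
  | (k, cs) :: rest =>
    if t.contains k = false && cs.all (fun c => t.contains c) then some (k, cs)
    else pvBReady t rest

-- while id not in table: resolve one ready node (none ready = ValueError in Python B)
def pvBLoop (id : String) (items : List (String × List String)) :
    Nat → PySem.Dict String Int → PySem.Dict String Int
  | 0, t => t
  | Nat.succ n, t =>
    if t.contains id then t
    else
      match pvBReady t items with
      | none => t                                               -- Python B raises here (outside Pre_)
      | some (k, cs) =>
        pvBLoop id items n (t.insert k (1 + (cs.map (fun c => t.getD c 0)).sum))

def getNodeCount_alt (id : String) (nodes : List (String × List String)) (visited : List (String × Int)) : Int :=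
  ((pvBLoop id (pvND nodes).items (pvFuel nodes visited) (pvVD visited) ).get? id).getD 0

-- ===== PRECONDITION & SPEC =====
-- successors of u in the graph A recurses through: none once u is cut off by `visited`
def pvStepList (nodes : List (String × List String)) (visited : List (String × Int)) (u : String) : List String :=
  if (pvVD visited).contains u then [] else ((pvND nodes).get? u).getD []
def pvGrow (nodes : List (String × List String)) (visited : List (String × Int)) (s : PySem.Set String) : PySem.Set String :=
  PySem.Set.update s (s.flatMap (pvStepList nodes visited))
-- everything reachable from `start` (iterated to a fixpoint; the iteration count always suffices)
def pvReachFrom (nodes : List (String × List String)) (visited : List (String × Int)) (start : List String) : PySem.Set String :=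
  (pvGrow nodes visited)^[(start ++ nodes.flatMap (fun p => p.2)).length + 1] (PySem.Set.ofList start)

-- Pre_ holds exactly when Python A returns: every id reachable from `id` (stopping at `visited`)
-- is a key of `nodes` or of `visited` (else KeyError), and no reachable id can reach itself
-- through unvisited nodes (else unbounded recursion, RecursionError).
def Pre_getNodeCount (id : String) (nodes : List (String × List String)) (visited : List (String × Int)) : Prop :=
  (∀ k ∈ pvReachFrom nodes visited [id],
      (pvVD visited).contains k = false → (pvND nodes).contains k = true)
  ∧ (∀ k ∈ pvReachFrom nodes visited [id],
      (pvVD visited).contains k = false → k ∉ pvReachFrom nodes visited (((pvND nodes).get? k).getD []))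
instance (id : String) (nodes : List (String × List String)) (visited : List (String × Int)) : Decidable (Pre_getNodeCount id nodes visited) := by unfold Pre_getNodeCount; infer_instance

def pvWitness_getNodeCount : String × (List (String × List String)) × (List (String × Int)) :=
  ("a", [("a", ["b", "b", "c"]), ("b", ["c"]), ("c", [])], [("c", 5)])

def Spec_getNodeCount (id : String) (nodes : List (String × List String)) (visited : List (String × Int)) (out : Int) : Prop := out = getNodeCount_alt id nodes visited
instance (id : String) (nodes : List (String × List String)) (visited : List (String × Int)) (out : Int) : Decidable (Spec_getNodeCount id nodes visited out) := by unfold Spec_getNodeCount; infer_instance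

-- ===== CLAIM (what is proved, stated in full; the proofs are below) =====
def Claim_equal_getNodeCount : Prop := ∀ (id : String) (nodes : List (String × List String)) (visited : List (String × Int)), Dom_getNodeCount id nodes visited → Pre_getNodeCount id nodes visited → Spec_getNodeCount id nodes visited (getNodeCount id nodes visited)

-- the edge relation A recurses along, and reachability
def PvStep (nodes : List (String × List String)) (visited : List (String × Int)) (u v : String) : Prop :=
  (pvVD visited).contains u = false ∧ ∃ cs, (pvND nodes).get? u = some cs ∧ v ∈ cs
def PvReach (nodes : List (String × List String)) (visited : List (String × Int)) (u v : String) : Prop :=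
  Relation.ReflTransGen (PvStep nodes visited) u v

-- reference value semantics (fuel-indexed); IsVal k v = "the count of k is v"
def pvOptSum (f : String → Option Int) : List String → Option Int
  | [] => some 0
  | c :: cs => (f c).bind (fun v => (pvOptSum f cs).map (fun s => v + s))
def pvCnt (nodes : List (String × List String)) (visited : List (String × Int)) :
    Nat → String → Option Int
  | 0, _ => none
  | Nat.succ n, k =>
    if (pvVD visited).contains k then (pvVD visited).get? k
    else ((pvND nodes).get? k).bind (fun cs => (pvOptSum (pvCnt nodes visited n) cs).map (fun s => 1 + s))
def PvIsVal (nodes : List (String × List String)) (visited : List (String × Int)) (k : String) (v : Int) : Prop :=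
  ∃ n, pvCnt nodes visited n k = some v
-- ===== LEMMAS AND PROOFS =====

-- Dict basics
theorem pv_contains_iff {ν : Type} (d : PySem.Dict String ν) (k : String) :
    d.contains k = true ↔ ∃ v, d.get? k = some v := by
  rw [PySem.Dict.contains_eq_isSome_get?, Option.isSome_iff_exists]

theorem pv_ofList_values_mem (nodes : List (String × List String)) (u : String)
    (cs : List String) (h : (pvND nodes).get? u = some cs) : cs ∈ nodes.map Prod.snd := by
  have key : ∀ (l : List (String × List String)) (d : PySem.Dict String (List String)),
      (l.foldl (fun acc p => acc.insert p.1 p.2) d).get? u = some cs →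
      cs ∈ l.map Prod.snd ∨ d.get? u = some cs := by
    intro l
    induction l with
    | nil => intro d h; exact Or.inr h
    | cons p l ih =>
      intro d h
      rcases ih _ h with h' | h'
      · exact Or.inl (List.mem_cons_of_mem _ h')
      · rw [PySem.Dict.get?_insert] at h'
        by_cases hu : u = p.1
        · simp [hu] at h'; exact Or.inl (h' ▸ List.mem_cons_self ..)
        · simp [hu] at h'; exact Or.inr h'
  rcases key nodes PySem.Dict.empty h with h' | h'
  · exact h'
  · rw [PySem.Dict.get?_empty] at h'; cases h'

-- reach-set machinery
theorem pv_grow_prefix (nodes : List (String × List String)) (visited : List (String × Int))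
    (s : PySem.Set String) : s <+: pvGrow nodes visited s := by
  unfold pvGrow; rw [PySem.Set.update_eq_append_filter]; exact ⟨_, rfl⟩

theorem pv_mem_grow (nodes : List (String × List String)) (visited : List (String × Int))
    (s : PySem.Set String) (x : String) :
    x ∈ pvGrow nodes visited s ↔ x ∈ s ∨ ∃ u ∈ s, x ∈ pvStepList nodes visited u := by
  unfold pvGrow; rw [PySem.Set.mem_update, List.mem_flatMap]

theorem pv_nodup_grow (nodes : List (String × List String)) (visited : List (String × Int))
    (s : PySem.Set String) (h : s.Nodup) : (pvGrow nodes visited s).Nodup :=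
  PySem.Set.nodup_update _ _ h

theorem pv_stepList_sub (nodes : List (String × List String)) (visited : List (String × Int))
    (u x : String) (h : x ∈ pvStepList nodes visited u) : x ∈ nodes.flatMap (fun p => p.2) := by
  unfold pvStepList at h
  split at h
  · cases h
  · rcases hg : (pvND nodes).get? u with _ | cs
    · rw [hg] at h; cases h
    · rw [hg] at h
      have := pv_ofList_values_mem nodes u cs hg
      rw [List.mem_map] at this
      obtain ⟨p, hp, hpe⟩ := this
      exact List.mem_flatMap.2 ⟨p, hp, hpe ▸ h⟩

theorem pv_mem_stepList_iff (nodes : List (String × List String)) (visited : List (String × Int))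
    (u x : String) : x ∈ pvStepList nodes visited u ↔ PvStep nodes visited u x := by
  unfold pvStepList PvStep
  rcases hV : (pvVD visited).contains u with _ | _
  · rw [if_neg (by simp)]
    rcases hg : (pvND nodes).get? u with _ | cs
    · simp
    · simp
  · rw [if_pos (by simp)]
    simp

-- an extensive, length-bounded iteration reaches a fixpoint within B+1 steps
theorem pv_iterate_fix (f : List String → List String) (s0 : List String) (B : Nat)
    (hpre : ∀ s, s <+: f s) (hlen : ∀ i, (f^[i] s0).length ≤ B) :
    f (f^[B + 1] s0) = f^[B + 1] s0 := by
  have hfix : ∃ i, i ≤ B ∧ f (f^[i] s0) = f^[i] s0 := by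
    by_contra hno
    push Not at hno
    have grow : ∀ i, i ≤ B + 1 → i ≤ (f^[i] s0).length := by
      intro i
      induction i with
      | zero => intro _; exact Nat.zero_le _
      | succ i ih =>
        intro hi
        have h1 : i ≤ (f^[i] s0).length := ih (Nat.le_of_succ_le hi)
        have hne : f (f^[i] s0) ≠ f^[i] s0 := hno i (Nat.le_of_succ_le_succ hi)
        have hp : f^[i] s0 <+: f (f^[i] s0) := hpre _
        have hlt : (f^[i] s0).length < (f (f^[i] s0)).length := by
          rcases Nat.lt_or_ge (f^[i] s0).length (f (f^[i] s0)).length with h | h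
          · exact h
          · exact absurd (List.IsPrefix.eq_of_length hp (Nat.le_antisymm (hp.length_le) h)).symm hne
        rw [Function.iterate_succ_apply']
        omega
    have := grow (B + 1) (Nat.le_refl _)
    have := hlen (B + 1)
    omega
  obtain ⟨i, hiB, hfix⟩ := hfix
  have pers : ∀ j, f^[i + j] s0 = f^[i] s0 := by
    intro j
    induction j with
    | zero => rfl
    | succ j ih => rw [← Nat.add_assoc, Function.iterate_succ_apply', ih, hfix]
  have h1 : f^[B + 1] s0 = f^[i] s0 := by
    have : i + (B + 1 - i) = B + 1 := by omega
    rw [← this, pers]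
  rw [h1, hfix]

theorem pv_reach_fix (nodes : List (String × List String)) (visited : List (String × Int))
    (start : List String) :
    pvGrow nodes visited (pvReachFrom nodes visited start) = pvReachFrom nodes visited start := by
  have hsub : ∀ i, ∀ x ∈ (pvGrow nodes visited)^[i] (PySem.Set.ofList start),
      x ∈ start ++ nodes.flatMap (fun p => p.2) := by
    intro i
    induction i with
    | zero => intro x hx; exact List.mem_append_left _ ((PySem.Set.mem_ofList _ _).1 hx)
    | succ i ih =>
      intro x hx
      rw [Function.iterate_succ_apply'] at hx
      rcases (pv_mem_grow nodes visited _ x).1 hx with h | ⟨u, _, hxu⟩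
      · exact ih x h
      · exact List.mem_append_right _ (pv_stepList_sub nodes visited u x hxu)
  have hnd : ∀ i, ((pvGrow nodes visited)^[i] (PySem.Set.ofList start)).Nodup := by
    intro i
    induction i with
    | zero => exact PySem.Set.nodup_ofList start
    | succ i ih => rw [Function.iterate_succ_apply']; exact pv_nodup_grow nodes visited _ ih
  have hlen : ∀ i, ((pvGrow nodes visited)^[i] (PySem.Set.ofList start)).length
      ≤ (start ++ nodes.flatMap (fun p => p.2)).length := by
    intro i
    calc ((pvGrow nodes visited)^[i] (PySem.Set.ofList start)).length
        = ((pvGrow nodes visited)^[i] (PySem.Set.ofList start)).toFinset.card :=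
          (List.toFinset_card_of_nodup (hnd i)).symm
      _ ≤ (start ++ nodes.flatMap (fun p => p.2)).toFinset.card := by
          apply Finset.card_le_card
          intro x hx
          rw [List.mem_toFinset] at hx ⊢
          exact hsub i x hx
      _ ≤ (start ++ nodes.flatMap (fun p => p.2)).length := List.toFinset_card_le _
  exact pv_iterate_fix (pvGrow nodes visited) (PySem.Set.ofList start)
    (start ++ nodes.flatMap (fun p => p.2)).length (pv_grow_prefix nodes visited) hlen

theorem pv_mem_reach_iff (nodes : List (String × List String)) (visited : List (String × Int))
    (start : List String) (x : String) :
    x ∈ pvReachFrom nodes visited start ↔ ∃ u ∈ start, PvReach nodes visited u x := by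
  constructor
  · have key : ∀ i y, y ∈ (pvGrow nodes visited)^[i] (PySem.Set.ofList start) →
        ∃ u ∈ start, PvReach nodes visited u y := by
      intro i
      induction i with
      | zero =>
        intro y hy
        exact ⟨y, (PySem.Set.mem_ofList _ _).1 hy, Relation.ReflTransGen.refl⟩
      | succ i ih =>
        intro y hy
        rw [Function.iterate_succ_apply'] at hy
        rcases (pv_mem_grow nodes visited _ y).1 hy with h | ⟨u, hu, hyu⟩
        · exact ih y h
        · obtain ⟨w, hw, hreach⟩ := ih u hu
          exact ⟨w, hw, hreach.tail ((pv_mem_stepList_iff nodes visited u y).1 hyu)⟩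
    exact key _ x
  · rintro ⟨u, hu, hreach⟩
    have hstart : ∀ i, PySem.Set.ofList start <+: (pvGrow nodes visited)^[i] (PySem.Set.ofList start) := by
      intro i
      induction i with
      | zero => exact List.prefix_refl _
      | succ i ih =>
        rw [Function.iterate_succ_apply']
        exact ih.trans (pv_grow_prefix nodes visited _)
    induction hreach with
    | refl =>
      show u ∈ pvReachFrom nodes visited start
      unfold pvReachFrom
      exact (hstart _).subset ((PySem.Set.mem_ofList _ _).2 hu)
    | @tail b c hab hbc ih =>
      have hc : c ∈ pvGrow nodes visited (pvReachFrom nodes visited start) :=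
        (pv_mem_grow nodes visited _ c).2
          (Or.inr ⟨b, ih, (pv_mem_stepList_iff nodes visited b c).2 hbc⟩)
      rw [pv_reach_fix] at hc
      exact hc

theorem pv_mem_reach_single (nodes : List (String × List String)) (visited : List (String × Int))
    (u x : String) :
    x ∈ pvReachFrom nodes visited [u] ↔ PvReach nodes visited u x := by
  rw [pv_mem_reach_iff]; simp

-- the rank function: number of ids reachable from k (within the finite universe)
def pvUniv (id : String) (nodes : List (String × List String)) (visited : List (String × Int)) : List String :=
  id :: (visited.map Prod.fst ++ nodes.map Prod.fst)

noncomputable def pvMu (id : String) (nodes : List (String × List String))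
    (visited : List (String × Int)) (k : String) : Nat :=
  @Finset.card String (@Finset.filter String (fun y => PvReach nodes visited k y)
    (Classical.decPred _) (pvUniv id nodes visited).toFinset)

theorem pv_keysND_sub (nodes : List (String × List String)) (k : String)
    (h : (pvND nodes).contains k = true) : k ∈ nodes.map Prod.fst := by
  rw [PySem.Dict.contains_iff_mem_keys] at h
  have : (pvND nodes).keys = PySem.Set.update PySem.Dict.empty.keys (nodes.map Prod.fst) :=
    PySem.Dict.keys_foldl_insert_key nodes Prod.fst (fun _ x => x.2) PySem.Dict.empty
  rw [this] at h
  rcases (PySem.Set.mem_update _ _ _).1 h with h' | h'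
  · rw [PySem.Dict.keys_empty] at h'; cases h'
  · exact h'

theorem pvMu_lt_fuel (id : String) (nodes : List (String × List String))
    (visited : List (String × Int)) (k : String) :
    pvMu id nodes visited k < pvFuel nodes visited := by
  classical
  unfold pvMu
  have h1 := Finset.card_filter_le (pvUniv id nodes visited).toFinset
    (fun y => PvReach nodes visited k y)
  have h2 := List.toFinset_card_le (pvUniv id nodes visited)
  have h3 : (pvUniv id nodes visited).length = visited.length + nodes.length + 1 := by
    simp [pvUniv]
  unfold pvFuel
  omega

theorem pvMu_decr (id : String) (nodes : List (String × List String)) (visited : List (String × Int))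
    (hPre : Pre_getNodeCount id nodes visited) (k c : String) (cs : List String)
    (hk : PvReach nodes visited id k) (hV : (pvVD visited).contains k = false)
    (hcs : (pvND nodes).get? k = some cs) (hc : c ∈ cs) :
    pvMu id nodes visited c < pvMu id nodes visited k := by
  classical
  unfold pvMu
  apply Finset.card_lt_card
  have hstep : PvStep nodes visited k c := ⟨hV, cs, hcs, hc⟩
  have hsub : @Finset.filter String (fun y => PvReach nodes visited c y) (Classical.decPred _)
      (pvUniv id nodes visited).toFinset
      ⊆ @Finset.filter String (fun y => PvReach nodes visited k y) (Classical.decPred _)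
      (pvUniv id nodes visited).toFinset := by
    intro y hy
    rw [Finset.mem_filter] at hy ⊢
    exact ⟨hy.1, Relation.ReflTransGen.head hstep hy.2⟩
  rw [Finset.ssubset_iff_of_subset hsub]
  refine ⟨k, ?_, ?_⟩
  · rw [Finset.mem_filter]
    constructor
    · rw [List.mem_toFinset]
      have hkR : k ∈ pvReachFrom nodes visited [id] := (pv_mem_reach_single nodes visited id k).2 hk
      have := pv_keysND_sub nodes k (hPre.1 k hkR hV)
      unfold pvUniv
      exact List.mem_cons_of_mem _ (List.mem_append_right _ this)
    · exact Relation.ReflTransGen.refl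
  · rw [Finset.mem_filter]
    rintro ⟨-, hck⟩
    have hkR : k ∈ pvReachFrom nodes visited [id] := (pv_mem_reach_single nodes visited id k).2 hk
    have h2 := hPre.2 k hkR hV
    rw [hcs] at h2
    exact h2 ((pv_mem_reach_iff nodes visited cs k).2 ⟨c, hc, hck⟩)

-- value semantics
theorem pv_optSum_mono (f g : String → Option Int)
    (hfg : ∀ c v, f c = some v → g c = some v) :
    ∀ cs s, pvOptSum f cs = some s → pvOptSum g cs = some s := by
  intro cs
  induction cs with
  | nil => intro s h; exact h
  | cons c cs ih =>
    intro s h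
    unfold pvOptSum at h ⊢
    rcases hf : f c with _ | v
    · rw [hf] at h; cases h
    · rw [hf] at h
      rcases hs : pvOptSum f cs with _ | s'
      · rw [hs] at h; cases h
      · rw [hs] at h
        rw [hfg c v hf, ih s' hs]
        exact h

theorem pvCnt_mono (nodes : List (String × List String)) (visited : List (String × Int)) :
    ∀ n k v, pvCnt nodes visited n k = some v → pvCnt nodes visited (n + 1) k = some v := by
  intro n
  induction n with
  | zero => intro k v h; cases h
  | succ n ih =>
    intro k v h
    unfold pvCnt at h ⊢
    by_cases hV : (pvVD visited).contains k = true
    · rw [if_pos hV] at h ⊢; exact h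
    · rw [if_neg hV] at h ⊢
      rcases hg : (pvND nodes).get? k with _ | cs
      · rw [hg] at h; simp at h
      · rw [hg, Option.bind_some] at h
        rw [Option.bind_some] at ⊢
        rcases hs : pvOptSum (pvCnt nodes visited n) cs with _ | s
        · rw [hs] at h; cases h
        · rw [hs] at h
          rw [pv_optSum_mono _ _ (fun c v hc => ih c v hc) cs s hs]
          exact h

theorem pvCnt_le (nodes : List (String × List String)) (visited : List (String × Int))
    {m n : Nat} (h : m ≤ n) (k : String) (v : Int) (hv : pvCnt nodes visited m k = some v) :
    pvCnt nodes visited n k = some v := by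
  induction h with
  | refl => exact hv
  | step h ih => exact pvCnt_mono nodes visited _ k v ih

theorem pvIsVal_det (nodes : List (String × List String)) (visited : List (String × Int))
    (k : String) (v w : Int) (hv : PvIsVal nodes visited k v) (hw : PvIsVal nodes visited k w) :
    v = w := by
  obtain ⟨m, hm⟩ := hv; obtain ⟨n, hn⟩ := hw
  have h1 := pvCnt_le nodes visited (Nat.le_max_left m n) k v hm
  have h2 := pvCnt_le nodes visited (Nat.le_max_right m n) k w hn
  rw [h1] at h2; exact Option.some_injective _ h2

theorem pv_optSum_forall2 (nodes : List (String × List String)) (visited : List (String × Int))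
    (cs : List String) (vs : List Int) (h : List.Forall₂ (PvIsVal nodes visited) cs vs) :
    ∃ m, pvOptSum (pvCnt nodes visited m) cs = some vs.sum := by
  induction h with
  | nil => exact ⟨0, rfl⟩
  | @cons c v cs vs hcv _ ih =>
    obtain ⟨m1, hm1⟩ := ih
    obtain ⟨m2, hm2⟩ := hcv
    refine ⟨max m1 m2, ?_⟩
    have h1 : pvOptSum (pvCnt nodes visited (max m1 m2)) cs = some vs.sum :=
      pv_optSum_mono _ _ (fun c' v' hc' => pvCnt_le nodes visited (Nat.le_max_left m1 m2) c' v' hc') cs vs.sum hm1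
    have h2 : pvCnt nodes visited (max m1 m2) c = some v :=
      pvCnt_le nodes visited (Nat.le_max_right m1 m2) c v hm2
    unfold pvOptSum
    rw [h2, h1]
    simp

theorem pv_mkIsVal (nodes : List (String × List String)) (visited : List (String × Int))
    (k : String) (cs : List String) (vs : List Int)
    (hV : (pvVD visited).contains k = false) (hcs : (pvND nodes).get? k = some cs)
    (h : List.Forall₂ (PvIsVal nodes visited) cs vs) :
    PvIsVal nodes visited k (1 + vs.sum) := by
  obtain ⟨m, hm⟩ := pv_optSum_forall2 nodes visited cs vs h
  exact ⟨m + 1, by unfold pvCnt; rw [if_neg (by simp [hV]), hcs, Option.bind_some, hm]; rfl⟩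

-- the invariant both programs maintain on their table
def PvInv (nodes : List (String × List String)) (visited : List (String × Int))
    (d : PySem.Dict String Int) : Prop :=
  (∀ x, (pvVD visited).contains x = true → d.contains x = true)
  ∧ (∀ x v, d.get? x = some v → PvIsVal nodes visited x v)

theorem pvInv_init (nodes : List (String × List String)) (visited : List (String × Int)) :
    PvInv nodes visited (pvVD visited) := by
  constructor
  · exact fun x h => h
  · intro x v h
    refine ⟨1, ?_⟩
    have hc : (pvVD visited).contains x = true := (pv_contains_iff _ _).2 ⟨v, h⟩
    simp [pvCnt, hc, h]

theorem pvInv_insert (nodes : List (String × List String)) (visited : List (String × Int))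
    (d : PySem.Dict String Int) (k : String) (v : Int)
    (hInv : PvInv nodes visited d) (hv : PvIsVal nodes visited k v) :
    PvInv nodes visited (d.insert k v) := by
  constructor
  · intro x h
    rw [PySem.Dict.contains_insert]
    simp [hInv.1 x h]
  · intro x w h
    rw [PySem.Dict.get?_insert] at h
    by_cases hx : x = k
    · simp [hx] at h; exact hx ▸ h ▸ hv
    · simp [hx] at h; exact hInv.2 x w h

-- A's recursion computes IsVal values
theorem pvAGo_ok (id : String) (nodes : List (String × List String)) (visited : List (String × Int))
    (hPre : Pre_getNodeCount id nodes visited) :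
    ∀ n k d, PvInv nodes visited d → pvMu id nodes visited k < n → PvReach nodes visited id k →
    ∃ v d', pvAGo (pvND nodes) n k d = some (v, d') ∧ PvIsVal nodes visited k v
      ∧ PvInv nodes visited d' ∧ (∀ x w, d.get? x = some w → d'.get? x = some w) := by
  intro n
  induction n with
  | zero => intro k d _ hmu _; omega
  | succ n ih =>
    intro k d hInv hmu hreach
    by_cases hctn : d.contains k = true
    · obtain ⟨v, hv⟩ := (pv_contains_iff d k).1 hctn
      refine ⟨v, d, ?_, hInv.2 k v hv, hInv, fun x w h => h⟩
      simp only [pvAGo]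
      rw [if_pos hctn, hv]
      rfl
    · have hV : (pvVD visited).contains k = false := by
        rcases h : (pvVD visited).contains k with _ | _
        · rfl
        · exact absurd (hInv.1 k h) hctn
      have hkR : k ∈ pvReachFrom nodes visited [id] := (pv_mem_reach_single nodes visited id k).2 hreach
      obtain ⟨cs, hcs⟩ := (pv_contains_iff _ k).1 (hPre.1 k hkR hV)
      have fold : ∀ (cs' : List String), (∀ c ∈ cs', c ∈ cs) → ∀ (a : Int) d₀,
          PvInv nodes visited d₀ →
          ∃ vs d', cs'.foldl (fun acc c => acc.bind
              (fun p => (pvAGo (pvND nodes) n c p.2).map (fun q => (p.1 + q.1, q.2))))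
              (some (a, d₀))
            = some (a + vs.sum, d')
            ∧ List.Forall₂ (PvIsVal nodes visited) cs' vs
            ∧ PvInv nodes visited d'
            ∧ (∀ x w, d₀.get? x = some w → d'.get? x = some w) := by
        intro cs'
        induction cs' with
        | nil =>
          intro _ a d₀ hI
          exact ⟨[], d₀, by simp, List.Forall₂.nil, hI, fun x w h => h⟩
        | cons c cs'' ihc =>
          intro hsub a d₀ hI
          have hc : c ∈ cs := hsub c (List.mem_cons_self ..)
          have hmuc : pvMu id nodes visited c < n := by
            have := pvMu_decr id nodes visited hPre k c cs hreach hV hcs hc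
            omega
          have hreachc : PvReach nodes visited id c := hreach.tail ⟨hV, cs, hcs, hc⟩
          obtain ⟨v, d₁, hrun, hval, hI1, hE1⟩ := ih c d₀ hI hmuc hreachc
          obtain ⟨vs, d', hrun2, hf2, hI2, hE2⟩ :=
            ihc (fun x hx => hsub x (List.mem_cons_of_mem _ hx)) (a + v) d₁ hI1
          refine ⟨v :: vs, d', ?_, List.Forall₂.cons hval hf2, hI2,
            fun x w h => hE2 x w (hE1 x w h)⟩
          rw [List.foldl_cons, Option.bind_some, hrun]
          simp only [Option.map_some]
          rw [hrun2]
          congr 2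
          simp
          ring
      obtain ⟨vs, d', hrun, hf, hI', hE'⟩ := fold cs (fun c h => h) 1 d hInv
      have hnone : d.get? k = none := by
        rcases h : d.get? k with _ | w
        · rfl
        · exact absurd ((pv_contains_iff d k).2 ⟨w, h⟩) hctn
      refine ⟨1 + vs.sum, d'.insert k (1 + vs.sum), ?_,
        pv_mkIsVal nodes visited k cs vs hV hcs hf,
        pvInv_insert nodes visited d' k (1 + vs.sum) hI'
          (pv_mkIsVal nodes visited k cs vs hV hcs hf), ?_⟩
      · simp only [pvAGo]
        rw [if_neg hctn, hcs]
        simp only [hrun]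
      · intro x w h
        have hx : x ≠ k := by
          intro he; rw [he, hnone] at h; cases h
        rw [PySem.Dict.get?_insert, if_neg hx]
        exact hE' x w h

-- B's ready-node search
theorem pvBReady_spec (t : PySem.Dict String Int) :
    ∀ items k cs, pvBReady t items = some (k, cs) →
    (k, cs) ∈ items ∧ t.contains k = false ∧ ∀ c ∈ cs, t.contains c = true := by
  intro items
  induction items with
  | nil => intro k cs h; cases h
  | cons q rest ih =>
    obtain ⟨qk, qcs⟩ := q
    intro k cs h
    simp only [pvBReady] at h
    split at h
    · rename_i hcond
      cases h
      rw [Bool.and_eq_true, decide_eq_true_eq] at hcond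
      exact ⟨List.mem_cons_self .., hcond.1, fun c hc => List.all_eq_true.1 hcond.2 c hc⟩
    · obtain ⟨h1, h2, h3⟩ := ih k cs h
      exact ⟨List.mem_cons_of_mem _ h1, h2, h3⟩

theorem pvBReady_isSome (t : PySem.Dict String Int) :
    ∀ items, (∃ p ∈ items, t.contains (Prod.fst p) = false
        ∧ ∀ c ∈ Prod.snd p, t.contains c = true) →
    (pvBReady t items).isSome := by
  intro items
  induction items with
  | nil => rintro ⟨p, hp, -⟩; cases hp
  | cons q rest ih =>
    rintro ⟨p, hp, h1, h2⟩
    obtain ⟨qk, qcs⟩ := q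
    simp only [pvBReady]
    split
    · rfl
    · rename_i hcond
      apply ih
      rcases List.mem_cons.1 hp with he | hm
      · exfalso
        apply hcond
        rw [Bool.and_eq_true]
        subst he
        exact ⟨by simp [h1], List.all_eq_true.2 (fun c hc => h2 c hc)⟩
      · exact ⟨p, hm, h1, h2⟩

theorem pv_ready_exists (id : String) (nodes : List (String × List String))
    (visited : List (String × Int)) (hPre : Pre_getNodeCount id nodes visited)
    (t : PySem.Dict String Int) (hInv : PvInv nodes visited t) :
    ∀ m k, PvReach nodes visited id k → t.contains k = false → pvMu id nodes visited k ≤ m →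
    ∃ p ∈ (pvND nodes).items, t.contains (Prod.fst p) = false
      ∧ ∀ c ∈ Prod.snd p, t.contains c = true := by
  intro m
  induction m with
  | zero =>
    intro k hreach hctn hmu
    have hV : (pvVD visited).contains k = false := by
      rcases h : (pvVD visited).contains k with _ | _
      · rfl
      · rw [hInv.1 k h] at hctn; cases hctn
    have hkR : k ∈ pvReachFrom nodes visited [id] := (pv_mem_reach_single nodes visited id k).2 hreach
    obtain ⟨cs, hcs⟩ := (pv_contains_iff _ k).1 (hPre.1 k hkR hV)
    refine ⟨(k, cs), PySem.Dict.mem_items_of_get?_eq_some _ hcs, hctn, ?_⟩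
    intro c hc
    rcases h : t.contains c with _ | _
    · have := pvMu_decr id nodes visited hPre k c cs hreach hV hcs hc
      omega
    · rfl
  | succ m ih =>
    intro k hreach hctn hmu
    have hV : (pvVD visited).contains k = false := by
      rcases h : (pvVD visited).contains k with _ | _
      · rfl
      · rw [hInv.1 k h] at hctn; cases hctn
    have hkR : k ∈ pvReachFrom nodes visited [id] := (pv_mem_reach_single nodes visited id k).2 hreach
    obtain ⟨cs, hcs⟩ := (pv_contains_iff _ k).1 (hPre.1 k hkR hV)
    by_cases hall : ∀ c ∈ cs, t.contains c = true
    · exact ⟨(k, cs), PySem.Dict.mem_items_of_get?_eq_some _ hcs, hctn, hall⟩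
    · push Not at hall
      obtain ⟨c, hc, hcf⟩ := hall
      have hcf' : t.contains c = false := by
        rcases h : t.contains c with _ | _
        · rfl
        · exact absurd h hcf
      have hmuc := pvMu_decr id nodes visited hPre k c cs hreach hV hcs hc
      exact ih c (hreach.tail ⟨hV, cs, hcs, hc⟩) hcf' (by omega)

-- B's loop resolves id with an IsVal value
theorem pvBLoop_ok (id : String) (nodes : List (String × List String)) (visited : List (String × Int))
    (hPre : Pre_getNodeCount id nodes visited) :
    ∀ n t, PvInv nodes visited t →
    ((pvND nodes).keys.toFinset \ t.keys.toFinset).card < n →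
    ∃ v, (pvBLoop id (pvND nodes).items n t).get? id = some v ∧ PvIsVal nodes visited id v := by
  intro n
  induction n with
  | zero => intro t _ hcard; omega
  | succ n ih =>
    intro t hI hcard
    simp only [pvBLoop]
    by_cases hid : t.contains id = true
    · rw [if_pos hid]
      obtain ⟨v, hv⟩ := (pv_contains_iff t id).1 hid
      exact ⟨v, hv, hI.2 id v hv⟩
    · rw [if_neg hid]
      have hidf : t.contains id = false := by
        rcases h : t.contains id with _ | _
        · rfl
        · exact absurd h hid
      have hex := pv_ready_exists id nodes visited hPre t hI (pvMu id nodes visited id) id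
        Relation.ReflTransGen.refl hidf (Nat.le_refl _)
      have hsome := pvBReady_isSome t (pvND nodes).items hex
      obtain ⟨⟨k, cs⟩, hk⟩ := Option.isSome_iff_exists.1 hsome
      rw [hk]
      obtain ⟨hmem, hKf, hall⟩ := pvBReady_spec t (pvND nodes).items k cs hk
      have hVk : (pvVD visited).contains k = false := by
        rcases h : (pvVD visited).contains k with _ | _
        · rfl
        · rw [hI.1 k h] at hKf; cases hKf
      have hNk : (pvND nodes).get? k = some cs :=
        PySem.Dict.get?_of_mem_items _ hmem (PySem.Dict.nodup_keys_ofList nodes)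
      have hf : List.Forall₂ (PvIsVal nodes visited) cs (cs.map (fun c => t.getD c 0)) := by
        rw [List.forall₂_map_right_iff]
        rw [List.forall₂_same]
        intro c hc
        obtain ⟨vc, hvc⟩ := (pv_contains_iff t c).1 (hall c hc)
        rw [PySem.Dict.getD_of_get?_eq_some t 0 hvc]
        exact hI.2 c vc hvc
      have hval : PvIsVal nodes visited k (1 + (cs.map (fun c => t.getD c 0)).sum) :=
        pv_mkIsVal nodes visited k cs _ hVk hNk hf
      apply ih _ (pvInv_insert nodes visited t k _ hI hval)
      have hknk : k ∈ (pvND nodes).keys := PySem.Dict.mem_keys_of_mem_items _ hmem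
      have hknott : k ∉ t.keys := by
        intro hin
        rw [← PySem.Dict.contains_iff_mem_keys] at hin
        rw [hin] at hKf; cases hKf
      rw [PySem.Dict.keys_insert_of_not_contains t _ hKf]
      have hsub : (pvND nodes).keys.toFinset \ (t.keys ++ [k]).toFinset
          ⊆ (pvND nodes).keys.toFinset \ t.keys.toFinset := by
        intro x hx
        rw [Finset.mem_sdiff] at hx ⊢
        refine ⟨hx.1, fun hxt => hx.2 ?_⟩
        rw [List.mem_toFinset] at hxt ⊢
        exact List.mem_append_left _ hxt
      have hklt : ((pvND nodes).keys.toFinset \ (t.keys ++ [k]).toFinset).card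
          < ((pvND nodes).keys.toFinset \ t.keys.toFinset).card := by
        apply Finset.card_lt_card
        rw [Finset.ssubset_iff_of_subset hsub]
        refine ⟨k, ?_, ?_⟩
        · rw [Finset.mem_sdiff, List.mem_toFinset, List.mem_toFinset]
          exact ⟨hknk, hknott⟩
        · rw [Finset.mem_sdiff]
          rintro ⟨-, hk2⟩
          exact hk2 (List.mem_toFinset.2 (List.mem_append_right _ (List.mem_cons_self ..)))
      omega

-- ===== VERDICT (by name: the statement is the Claim_ definition above) =====
theorem getNodeCount_spec : Claim_equal_getNodeCount := by
  intro id nodes visited _ hPre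
  unfold Spec_getNodeCount getNodeCount getNodeCount_alt
  obtain ⟨vA, d', hrunA, hvalA, -, -⟩ := pvAGo_ok id nodes visited hPre
    (pvFuel nodes visited) id (pvVD visited) (pvInv_init nodes visited)
    (pvMu_lt_fuel id nodes visited id) Relation.ReflTransGen.refl
  have hcard : ((pvND nodes).keys.toFinset \ (pvVD visited).keys.toFinset).card
      < pvFuel nodes visited := by
    have h1 := Finset.card_le_card
      (Finset.sdiff_subset (s := (pvND nodes).keys.toFinset) (t := (pvVD visited).keys.toFinset))
    have h2 := List.toFinset_card_le (pvND nodes).keys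
    have h3 : (pvND nodes).keys.length ≤ nodes.length := by
      have hk : (pvND nodes).keys = PySem.Set.update PySem.Dict.empty.keys (nodes.map Prod.fst) :=
        PySem.Dict.keys_foldl_insert_key nodes Prod.fst (fun _ x => x.2) PySem.Dict.empty
      rw [hk, PySem.Dict.keys_empty, PySem.Set.update_nil_left]
      have := PySem.Set.length_ofList_le (nodes.map Prod.fst)
      simpa using this
    unfold pvFuel
    omega
  obtain ⟨vB, hrunB, hvalB⟩ := pvBLoop_ok id nodes visited hPre
    (pvFuel nodes visited) (pvVD visited) (pvInv_init nodes visited) hcard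
  rw [hrunA, hrunB]
  simp only [Option.map_some, Option.getD_some]
  exact pvIsVal_det nodes visited id vA vB hvalA hvalB
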